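-- pv_equiv track=rewrite | github.com/NormPlum/freeCodeCamp_DailyCodingChallenges | 248.py | sort_and_swap
-- ===== SOURCE A (Python) =====
-- def sort_and_swap(arr):
--     result = []
--     arr.sort()
--
--     for i, num in enumerate(arr):
--         if i > 0 and i % 3 == 0:
--             previous = result[i-1]
--             result[i-1] = num
--             result.append(previous)
--         else:
--             result.append(num)
--
--     return result
-- ===== SOURCE B (Python) =====
-- def sort_and_swap(arr):
--     arr.sort()
--     out = arr[:2]
--     # emit the remainder three at a time as reordered slice blocks;
--     # out-of-range slices vanish, so short tail blocks need no special case
--     for k in range(2, len(arr), 3):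
--         out += arr[k+1:k+2] + arr[k:k+1] + arr[k+2:k+3]
--     return out
-- ===== Notes on version B (the rewrite author's own statement) =====
-- stated objective: alternative
-- what changed: A builds the result in a single enumerate loop that conditionally rewrites result[i-1] and appends; B never indexes or rewrites the result: it keeps the first two sorted elements and then appends each 3-block of the rest as three one-element slices in swapped order (out-of-range slices vanish, so short tails need no special case).
import Mathlib
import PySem

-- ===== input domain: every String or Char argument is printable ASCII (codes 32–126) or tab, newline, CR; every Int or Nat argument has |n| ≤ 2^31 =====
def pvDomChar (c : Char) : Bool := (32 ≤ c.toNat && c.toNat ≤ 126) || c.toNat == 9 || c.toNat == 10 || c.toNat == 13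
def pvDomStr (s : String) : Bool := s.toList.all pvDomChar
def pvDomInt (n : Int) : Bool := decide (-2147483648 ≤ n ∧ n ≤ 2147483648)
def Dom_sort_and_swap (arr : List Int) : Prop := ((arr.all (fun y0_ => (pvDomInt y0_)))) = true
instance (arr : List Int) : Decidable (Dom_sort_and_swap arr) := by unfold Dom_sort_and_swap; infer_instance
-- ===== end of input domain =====

-- B replaces A's per-element enumerate loop (which conditionally rewrites result[i-1] and appends)
-- by block emission: keep the first two sorted elements, then append each 3-block of the rest as
-- three one-element slices in swapped order; the result list is never indexed or rewritten
-- (objective: alternative). Both Pythons sort `arr` in place (same observable mutation); the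
-- equivalence proved here is about the return value.

-- ===== PORT A =====
-- loop body of A's `for i, num in enumerate(arr)` (result is the accumulator, p = (i, num))
def stepA (result : List Int) (p : Int × Int) : List Int :=
  if p.1 > 0 ∧ PySem.Int.mod p.1 3 = 0 then
    -- previous = result[i-1]; result[i-1] = num; result.append(previous)
    PySem.List.pySetD result (p.1 - 1) p.2 ++ [PySem.List.pyGetD result (p.1 - 1) 0]
  else result ++ [p.2]

def sort_and_swap (arr : List Int) : List Int :=
  let s := PySem.List.sorted arr (fun x => x) false   -- arr.sort()
  (PySem.List.enumerate s 0).foldl stepA []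

-- ===== PORT B =====
-- loop body of B's `for k in range(2, len(arr), 3)`:
--   out += arr[k+1:k+2] + arr[k:k+1] + arr[k+2:k+3]
def stepB (s : List Int) (out : List Int) (k : Int) : List Int :=
  out ++ (PySem.List.slice s (some (k + 1)) (some (k + 2)) ++
          PySem.List.slice s (some k) (some (k + 1)) ++
          PySem.List.slice s (some (k + 2)) (some (k + 3)))

def sort_and_swap_alt (arr : List Int) : List Int :=
  let s := PySem.List.sorted arr (fun x => x) false   -- arr.sort()
  (PySem.List.pyRange 2 (s.length : Int) 3).foldl (stepB s) (s.take 2)   -- out = arr[:2]; loop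

-- ===== PRECONDITION & SPEC =====
def Spec_sort_and_swap (arr : List Int) (out : List Int) : Prop := out = sort_and_swap_alt arr
instance (arr : List Int) (out : List Int) : Decidable (Spec_sort_and_swap arr out) := by unfold Spec_sort_and_swap; infer_instance

-- ===== CLAIM (what is proved, stated in full; the proofs are below) =====
def Claim_equal_sort_and_swap : Prop := ∀ (arr : List Int), Dom_sort_and_swap arr → Spec_sort_and_swap arr (sort_and_swap arr)

-- ===== LEMMAS AND PROOFS =====

-- the common normal form: swap the first two elements of every 3-block
def chunk : List Int → List Int
  | [] => []
  | [x] => [x]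
  | [x, y] => [y, x]
  | x :: y :: z :: t => y :: x :: z :: chunk t

theorem pyRange3_nil (a b : Int) (h : b ≤ a) : PySem.List.pyRange a b 3 = [] := by
  rw [PySem.List.pyRange_of_pos a b (by norm_num)]
  simp [if_neg (by omega : ¬ a < b)]

theorem pyRange3_cons (a b : Int) (h : a < b) :
    PySem.List.pyRange a b 3 = a :: PySem.List.pyRange (a + 3) b 3 := by
  rw [PySem.List.pyRange_of_pos a b (by norm_num), PySem.List.pyRange_of_pos (a+3) b (by norm_num)]
  rw [if_pos h]
  by_cases h3 : a + 3 < b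
  · rw [if_pos h3]
    have h1 : ((b - a + 3 - 1) / 3).toNat = ((b - (a+3) + 3 - 1) / 3).toNat + 1 := by omega
    rw [h1, List.range_succ_eq_map]
    simp only [List.map_cons, List.map_map]
    congr 1
    · norm_num
    · apply List.map_congr_left; intro k _; simp [Function.comp]; ring
  · rw [if_neg h3]
    have h1 : ((b - a + 3 - 1) / 3).toNat = 1 := by omega
    simp [h1, List.range_succ]

-- A's step on a non-swap index (i % 3 ≠ 0) just appends
theorem stepA_append (acc : List Int) (i x : Int) (h : i % 3 ≠ 0) :
    stepA acc (i, x) = acc ++ [x] := by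
  unfold stepA
  rw [if_neg]
  simp only [not_and]
  intro _
  rw [PySem.Int.mod_eq_emod_of_pos (by norm_num)]
  omega

-- A's step on a swap index i = len(acc)+1 with acc = acc₀ ++ [x]: writes y over x and re-appends x
theorem stepA_swap (acc : List Int) (x y : Int) (h : ((acc.length : Int) + 1) % 3 = 0) :
    stepA (acc ++ [x]) ((acc.length : Int) + 1, y) = acc ++ [y, x] := by
  unfold stepA
  rw [if_pos ⟨by positivity, by rw [PySem.Int.mod_eq_emod_of_pos (by norm_num)]; omega⟩]
  simp only [add_sub_cancel_right]
  rw [PySem.List.pyGetD_natCast, PySem.List.pySetD_natCast]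
  simp [List.getD]

theorem A_core_aux (u : List Int) : ∀ (acc : List Int), (acc.length : Int) % 3 = 2 →
    (PySem.List.enumerate u (acc.length : Int)).foldl stepA acc = acc ++ chunk u := by
  induction u using chunk.induct with
  | case1 => intro acc _; simp [PySem.List.enumerate, chunk]
  | case2 x =>
    intro acc h
    simp only [PySem.List.enumerate_cons, PySem.List.enumerate_nil, List.foldl_cons, List.foldl_nil]
    rw [stepA_append acc _ x (by omega)]
    rfl
  | case3 x y =>
    intro acc h
    simp only [PySem.List.enumerate_cons, PySem.List.enumerate_nil, List.foldl_cons, List.foldl_nil]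
    rw [stepA_append acc _ x (by omega), stepA_swap acc x y (by omega)]
    rfl
  | case4 x y z t ih =>
    intro acc h
    simp only [PySem.List.enumerate_cons, List.foldl_cons]
    rw [stepA_append acc _ x (by omega), stepA_swap acc x y (by omega)]
    have hL : ((acc ++ [y, x]).length : Int) = (acc.length : Int) + 2 := by
      simp only [List.length_append, List.length_cons, List.length_nil]; push_cast; ring
    have hcast : (acc.length : Int) + 1 + 1 = ((acc ++ [y, x]).length : Int) := by
      rw [hL]; ring
    rw [hcast, stepA_append (acc ++ [y, x]) _ z (by rw [hL]; omega)]
    have hcast2 : ((acc ++ [y, x]).length : Int) + 1 = ((acc ++ [y, x, z]).length : Int) := by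
      simp only [List.length_append, List.length_cons, List.length_nil]; push_cast; ring
    have hlist : (acc ++ [y, x]) ++ [z] = acc ++ [y, x, z] := by simp
    have hL3 : ((acc ++ [y, x, z]).length : Int) % 3 = 2 := by
      simp only [List.length_append, List.length_cons, List.length_nil]; push_cast; omega
    rw [hcast2, hlist, ih (acc ++ [y, x, z]) hL3]
    simp [chunk]

theorem A_core (s : List Int) :
    (PySem.List.enumerate s 0).foldl stepA [] = s.take 2 ++ chunk (s.drop 2) := by
  match s with
  | [] => simp [PySem.List.enumerate, chunk]
  | [x] =>
    simp only [PySem.List.enumerate_cons, PySem.List.enumerate_nil, List.foldl_cons, List.foldl_nil]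
    rw [show stepA [] (0, x) = [] ++ [x] by unfold stepA; rw [if_neg (by simp)]]
    rfl
  | x :: y :: u =>
    simp only [PySem.List.enumerate_cons, List.foldl_cons]
    rw [show stepA [] (0, x) = [x] by unfold stepA; rw [if_neg (by simp)]; rfl]
    rw [show stepA [x] (0 + 1, y) = [x, y] from by
      rw [stepA_append [x] (0 + 1) y (by decide)]; rfl]
    have hc : (0 : Int) + 1 + 1 = (([x, y] : List Int).length : Int) := by norm_num
    rw [hc, A_core_aux u [x, y] (by norm_num)]
    rfl

-- B's step at Nat index k emits the 3-block at k of s, first two elements exchanged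
theorem stepB_blocks (s : List Int) (out : List Int) (k : Nat) :
    stepB s out (k : Int) =
      out ++ (((s.drop k).drop 1).take 1 ++ (s.drop k).take 1 ++ ((s.drop k).drop 2).take 1) := by
  unfold stepB
  have h1 : ((k : Int) + 1) = ((k + 1 : Nat) : Int) := by omega
  have h2 : ((k : Int) + 2) = ((k + 2 : Nat) : Int) := by omega
  have h3 : ((k : Int) + 3) = ((k + 3 : Nat) : Int) := by omega
  rw [h1, h2, h3, PySem.List.slice_natCast, PySem.List.slice_natCast, PySem.List.slice_natCast]
  have d1 : s.drop (k + 1) = (s.drop k).drop 1 := by rw [List.drop_drop]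
  have d2 : s.drop (k + 2) = (s.drop k).drop 2 := by rw [List.drop_drop]
  have e1 : k + 1 - k = 1 := by omega
  have e2 : k + 2 - (k + 1) = 1 := by omega
  have e3 : k + 3 - (k + 2) = 1 := by omega
  rw [e1, e2, e3, d1, d2]

theorem B_core_aux (n : Nat) : ∀ (s out : List Int) (k : Nat), s.length ≤ k + n →
    (PySem.List.pyRange (k : Int) (s.length : Int) 3).foldl (stepB s) out
      = out ++ chunk (s.drop k) := by
  induction n using Nat.strong_induction_on with
  | _ n ih =>
    intro s out k hn
    by_cases hk : s.length ≤ k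
    · rw [pyRange3_nil _ _ (by exact_mod_cast hk), List.drop_eq_nil_of_le hk]
      simp [chunk]
    · rw [not_le] at hk
      rw [pyRange3_cons _ _ (by exact_mod_cast hk)]
      simp only [List.foldl_cons]
      rw [stepB_blocks s out k]
      rcases hu : s.drop k with _ | ⟨x, _ | ⟨y, _ | ⟨z, t⟩⟩⟩
      · exact absurd (List.drop_eq_nil_iff.mp hu) (by omega)
      · have hl : s.length = k + 1 := by
          have := congrArg List.length hu; simp [List.length_drop] at this; omega
        rw [show ((k : Int) + 3) = ((k + 3 : Nat) : Int) by omega,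
            pyRange3_nil _ _ (by exact_mod_cast (by omega : s.length ≤ k + 3))]
        simp [chunk]
      · have hl : s.length = k + 2 := by
          have := congrArg List.length hu; simp [List.length_drop] at this; omega
        rw [show ((k : Int) + 3) = ((k + 3 : Nat) : Int) by omega,
            pyRange3_nil _ _ (by exact_mod_cast (by omega : s.length ≤ k + 3))]
        simp [chunk]
      · have hl : s.length = k + 3 + t.length := by
          have := congrArg List.length hu; simp [List.length_drop] at this; omega
        have hdrop : s.drop (k + 3) = t := by
          have : s.drop (k + 3) = (s.drop k).drop 3 := by rw [List.drop_drop]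
          rw [this, hu]; rfl
        have hn' : s.length ≤ (k + 3) + (n - 3) := by omega
        rw [show ((k : Int) + 3) = ((k + 3 : Nat) : Int) by omega,
            ih (n - 3) (by omega) s _ (k + 3) hn', hdrop]
        simp [chunk]

theorem B_core (s : List Int) :
    (PySem.List.pyRange 2 (s.length : Int) 3).foldl (stepB s) (s.take 2)
      = s.take 2 ++ chunk (s.drop 2) := by
  have := B_core_aux s.length s (s.take 2) 2 (by omega)
  simpa using this

-- ===== VERDICT (by name: the statement is the Claim_ definition above) =====
theorem sort_and_swap_spec : Claim_equal_sort_and_swap := by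
  intro arr _
  unfold Spec_sort_and_swap sort_and_swap sort_and_swap_alt
  rw [A_core, B_core]
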